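-- pv_equiv track=rewrite | github.com/AvrilMZ/Teoria_de_Algoritmos | Parciales/Modelos_PD.py | reconstruir
-- ===== SOURCE A (Python) =====
-- def ultima_compatible(charlas, actual):
-- 	for i in range(actual - 1, -1, -1):
-- 		if charlas[i][1] <= charlas[actual][0]:
-- 			return i
-- 	return -1
--
-- def reconstruir(OPT, charlas):
-- 	a_dar = []
-- 	ganancia_con_actual = 0
-- 	i = len(charlas) - 1
-- 	while i >= 0:
-- 		i_compatible = ultima_compatible(charlas, i)
-- 		if i_compatible != -1:
-- 			ganancia_con_actual = charlas[i][2] + OPT[i_compatible]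
-- 		else:
-- 			ganancia_con_actual = charlas[i][2]
-- 		if i > 0:
-- 			if ganancia_con_actual > OPT[i - 1]:
-- 				a_dar.append(charlas[i])
-- 				i = i_compatible
-- 			else:
-- 				i -= 1
-- 		else:
-- 			if ganancia_con_actual > 0:
-- 				a_dar.append(charlas[i])
-- 			break
-- 	a_dar.reverse()
-- 	return a_dar
-- ===== SOURCE B (Python) =====
-- def reconstruir(OPT, charlas):
-- 	# Precompute, for every i, the last compatible interval via a Pareto stack
-- 	# (strictly increasing finish times, increasing indices) + binary search,
-- 	# instead of A's backward linear scan at every step of the walk.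
-- 	pila = []  # entries (fin, indice), fin strictly increasing, indice increasing
-- 	p = []
-- 	for idx in range(len(charlas)):
-- 		inicio, fin, _ = charlas[idx]
-- 		# binary search: number of stack entries with fin_entry <= inicio
-- 		lo, hi = 0, len(pila)
-- 		while lo < hi:
-- 			mid = (lo + hi) // 2
-- 			if pila[mid][0] <= inicio:
-- 				lo = mid + 1
-- 			else:
-- 				hi = mid
-- 		p.append(pila[lo - 1][1] if lo > 0 else -1)
-- 		# pop entries dominated by (fin, idx): same-or-later finish, smaller index
-- 		while pila and pila[-1][0] >= fin:
-- 			pila.pop()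
-- 		pila.append((fin, idx))
-- 	res = []
-- 	i = len(charlas) - 1
-- 	while i >= 0:
-- 		if i == 0:
-- 			if charlas[0][2] > 0:
-- 				res.append(charlas[0])
-- 			break
-- 		j = p[i]
-- 		ganancia = charlas[i][2] + (OPT[j] if j != -1 else 0)
-- 		if ganancia > OPT[i - 1]:
-- 			res.append(charlas[i])
-- 			i = j
-- 		else:
-- 			i -= 1
-- 	res.reverse()
-- 	return res
-- ===== Notes on version B (the rewrite author's own statement) =====
-- stated objective: alternative
-- what changed: A rescans the talk list backwards (ultima_compatible) at every step of the reconstruction walk; B precomputes all last-compatible indices in one forward pass over a Pareto stack (strictly increasing finish times, increasing indices) queried by binary search, so the walk does no inner scan.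
import Mathlib
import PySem

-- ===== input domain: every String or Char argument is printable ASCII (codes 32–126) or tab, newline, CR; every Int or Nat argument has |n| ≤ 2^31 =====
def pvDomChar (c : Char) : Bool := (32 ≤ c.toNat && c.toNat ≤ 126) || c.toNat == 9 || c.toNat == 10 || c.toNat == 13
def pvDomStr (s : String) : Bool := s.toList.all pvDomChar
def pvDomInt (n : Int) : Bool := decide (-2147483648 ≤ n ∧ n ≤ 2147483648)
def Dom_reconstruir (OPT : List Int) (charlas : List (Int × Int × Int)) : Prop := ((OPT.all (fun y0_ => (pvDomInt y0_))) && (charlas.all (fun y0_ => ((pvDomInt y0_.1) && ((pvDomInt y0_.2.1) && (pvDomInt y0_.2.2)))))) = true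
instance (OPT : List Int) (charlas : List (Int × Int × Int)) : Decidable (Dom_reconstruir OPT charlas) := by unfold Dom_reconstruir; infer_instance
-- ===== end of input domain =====

-- B replaces A's per-step backward scan for the last compatible talk by a single
-- forward preprocessing pass building a Pareto stack (increasing finish, increasing
-- index) queried by binary search; objective: alternative algorithm, same values.

-- ===== PORT A =====
def ultimaCompatible (charlas : List (Int × Int × Int)) (actual : Int) : Int :=
  match (PySem.List.pyRange (actual - 1) (-1) (-1)).find?
      (fun i => decide ((PySem.List.pyGetD charlas i (0, 0, 0)).2.1
                        ≤ (PySem.List.pyGetD charlas actual (0, 0, 0)).1)) with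
  | some i => i
  | none => -1

def reconstruirGo (OPT : List Int) (charlas : List (Int × Int × Int)) :
    Nat → Int → List (Int × Int × Int) → List (Int × Int × Int)
  | 0, _, a_dar => a_dar
  | fuel + 1, i, a_dar =>
    if i < 0 then a_dar
    else
      let ic := ultimaCompatible charlas i
      let c := PySem.List.pyGetD charlas i (0, 0, 0)
      let g := if ic ≠ -1 then c.2.2 + PySem.List.pyGetD OPT ic 0 else c.2.2
      if 0 < i then
        if PySem.List.pyGetD OPT (i - 1) 0 < g then
          reconstruirGo OPT charlas fuel ic (a_dar ++ [c])
        else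
          reconstruirGo OPT charlas fuel (i - 1) a_dar
      else
        if 0 < g then a_dar ++ [c] else a_dar

def reconstruir (OPT : List Int) (charlas : List (Int × Int × Int)) : List (Int × Int × Int) :=
  (reconstruirGo OPT charlas (charlas.length + 1) ((charlas.length : Int) - 1) []).reverse

-- ===== PORT B =====
-- the binary-search while-loop of Source B
def bisect (pila : List (Int × Int)) (x : Int) (lo hi : Nat) : Nat :=
  if h : lo < hi then
    if (PySem.List.pyGetD pila (((lo + hi) / 2 : Nat) : Int) (0, 0)).1 ≤ x then
      bisect pila x ((lo + hi) / 2 + 1) hi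
    else
      bisect pila x lo ((lo + hi) / 2)
  else lo
termination_by hi - lo
decreasing_by all_goals omega

-- p.append(pila[lo-1][1] if lo > 0 else -1), with lo the binary-search result
def consulta (pila : List (Int × Int)) (x : Int) : Int :=
  let lo := bisect pila x 0 pila.length
  if 0 < lo then (PySem.List.pyGetD pila ((lo : Int) - 1) (0, 0)).2 else -1

-- while pila and pila[-1][0] >= fin: pila.pop()
def popGe (fin : Int) (pila : List (Int × Int)) : List (Int × Int) :=
  match h : pila.getLast? with
  | none => pila
  | some e =>
    if fin ≤ e.1 then popGe fin pila.dropLast else pila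
termination_by pila.length
decreasing_by
  have hne : pila ≠ [] := by intro hn; subst hn; simp at h
  have : 0 < pila.length := List.length_pos_iff.mpr hne
  simp [List.length_dropLast]; omega

-- body of Source B's preprocessing loop
def pasoP (charlas : List (Int × Int × Int)) (st : List (Int × Int) × List Int) (idx : Nat) :
    List (Int × Int) × List Int :=
  let c := charlas.getD idx (0, 0, 0)
  let pj := consulta st.1 c.1
  let pila' := popGe c.2.1 st.1 ++ [(c.2.1, (idx : Int))]
  (pila', st.2 ++ [pj])

def buildP (charlas : List (Int × Int × Int)) : List Int :=
  ((List.range charlas.length).foldl (pasoP charlas) ([], [])).2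

def reconstruirGoB (OPT : List Int) (charlas : List (Int × Int × Int)) (p : List Int) :
    Nat → Int → List (Int × Int × Int) → List (Int × Int × Int)
  | 0, _, res => res
  | fuel + 1, i, res =>
    if i < 0 then res
    else if i = 0 then
      let c := PySem.List.pyGetD charlas 0 (0, 0, 0)
      if 0 < c.2.2 then res ++ [c] else res
    else
      let j := PySem.List.pyGetD p i (-1)
      let c := PySem.List.pyGetD charlas i (0, 0, 0)
      let g := c.2.2 + (if j ≠ -1 then PySem.List.pyGetD OPT j 0 else 0)
      if PySem.List.pyGetD OPT (i - 1) 0 < g then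
        reconstruirGoB OPT charlas p fuel j (res ++ [c])
      else
        reconstruirGoB OPT charlas p fuel (i - 1) res

def reconstruir_alt (OPT : List Int) (charlas : List (Int × Int × Int)) : List (Int × Int × Int) :=
  let p := buildP charlas
  (reconstruirGoB OPT charlas p (charlas.length + 1) ((charlas.length : Int) - 1) []).reverse

-- ===== PRECONDITION & SPEC =====
-- Pre_ excludes exactly the inputs where Python A raises IndexError (OPT too short:
-- with at least two talks, A reads OPT[len(charlas)-2] on its first iteration).
def Pre_reconstruir (OPT : List Int) (charlas : List (Int × Int × Int)) : Prop :=
  charlas.length ≤ OPT.length + 1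
instance (OPT : List Int) (charlas : List (Int × Int × Int)) : Decidable (Pre_reconstruir OPT charlas) := by
  unfold Pre_reconstruir; infer_instance

def pvWitness_reconstruir : List Int × (List (Int × Int × Int)) := ([5], [(0, 1, 5), (2, 3, 7)])

def Spec_reconstruir (OPT : List Int) (charlas : List (Int × Int × Int)) (out : List (Int × Int × Int)) : Prop := out = reconstruir_alt OPT charlas
instance (OPT : List Int) (charlas : List (Int × Int × Int)) (out : List (Int × Int × Int)) : Decidable (Spec_reconstruir OPT charlas out) := by unfold Spec_reconstruir; infer_instance

-- ===== CLAIM (what is proved, stated in full; the proofs are below) =====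
def Claim_equal_reconstruir : Prop := ∀ (OPT : List Int) (charlas : List (Int × Int × Int)), Dom_reconstruir OPT charlas → Pre_reconstruir OPT charlas → Spec_reconstruir OPT charlas (reconstruir OPT charlas)

-- ===== LEMMAS AND PROOFS =====

-- greatest j < m satisfying qI, scanned from above (A's backward scan, closed form)
def descMaxI (qI : Int → Bool) : Nat → Int
  | 0 => -1
  | m + 1 => if qI (m : Int) then (m : Int) else descMaxI qI m

-- the takeWhile-based description of what `consulta` returns on a sorted stack
def lastTW (s : List (Int × Int)) (x : Int) : Int :=
  match (s.takeWhile (fun e => decide (e.1 ≤ x))).getLast? with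
  | some e => e.2
  | none => -1


-- --- generic takeWhile lemmas ---

lemma takeWhile_concat_false {α : Type} (p : α → Bool) (e : α) (h : p e = false) :
    ∀ t : List α, (t ++ [e]).takeWhile p = t.takeWhile p := by
  intro t; induction t with
  | nil => simp [List.takeWhile, h]
  | cons a t ih =>
    simp only [List.cons_append, List.takeWhile]
    cases hpa : p a <;> simp [hpa, ih]

lemma takeWhile_all {α : Type} (p : α → Bool) :
    ∀ l : List α, (∀ a ∈ l, p a = true) → l.takeWhile p = l := by
  intro l; induction l with
  | nil => simp
  | cons a t ih =>
    intro h
    simp only [List.takeWhile, h a (by simp)]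
    simp [ih (fun b hb => h b (by simp [hb]))]

lemma takeWhile_takeWhile_imp {α : Type} (p r : α → Bool)
    (h : ∀ e, p e = true → r e = true) :
    ∀ l : List α, (l.takeWhile r).takeWhile p = l.takeWhile p := by
  intro l; induction l with
  | nil => simp
  | cons a t ih =>
    simp only [List.takeWhile]
    cases hra : r a with
    | true => simp only [List.takeWhile]; cases hpa : p a <;> simp [hpa, ih]
    | false =>
      have hpa : p a = false := by
        cases hpa : p a
        · rfl
        · exact absurd (h a hpa) (by simp [hra])
      simp [hpa]

lemma takeWhile_getD {α : Type} (p : α → Bool) (d : α) :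
    ∀ (s : List α) (m : Nat), m < (s.takeWhile p).length →
      (s.takeWhile p).getD m d = s.getD m d ∧ p (s.getD m d) = true := by
  intro s; induction s with
  | nil => simp
  | cons a t ih =>
    intro m hm
    cases hpa : p a with
    | false => simp [List.takeWhile, hpa] at hm
    | true =>
      simp only [List.takeWhile, hpa] at hm ⊢
      cases m with
      | zero => simp [hpa]
      | succ m => simpa using ih m (by simpa using hm)

lemma takeWhile_firstFail {α : Type} (p : α → Bool) (d : α) :
    ∀ s : List α, (s.takeWhile p).length < s.length →
      p (s.getD (s.takeWhile p).length d) = false := by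
  intro s; induction s with
  | nil => simp
  | cons a t ih =>
    intro h
    cases hpa : p a with
    | false => simpa [List.takeWhile, hpa] using hpa
    | true =>
      simp only [List.takeWhile, hpa] at h ⊢
      simpa using ih (by simpa using h)

-- --- binary search correctness ---

lemma bisect_eq (s : List (Int × Int)) (x : Int) (n : Nat)
    (hlow : ∀ m : Nat, m < n → ((s.getD m (0, 0)).1 ≤ x))
    (hhigh : ∀ m : Nat, n ≤ m → m < s.length → ¬ ((s.getD m (0, 0)).1 ≤ x)) :
    ∀ k lo hi, hi - lo ≤ k → lo ≤ n → n ≤ hi → hi ≤ s.length → bisect s x lo hi = n := by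
  intro k; induction k with
  | zero =>
    intro lo hi h1 h2 h3 h4
    unfold bisect
    rw [dif_neg (by omega)]
    omega
  | succ k ih =>
    intro lo hi h1 h2 h3 h4
    unfold bisect
    by_cases hlt : lo < hi
    · rw [dif_pos hlt]
      have hmid1 : lo ≤ (lo + hi) / 2 := by omega
      have hmid2 : (lo + hi) / 2 < hi := by omega
      have hmlen : (lo + hi) / 2 < s.length := by omega
      rw [PySem.List.pyGetD_natCast]
      by_cases hv : (s.getD ((lo + hi) / 2) (0, 0)).1 ≤ x
      · rw [if_pos hv]
        have hmn : (lo + hi) / 2 < n := by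
          by_contra hc
          exact hhigh _ (by omega) hmlen hv
        exact ih ((lo + hi) / 2 + 1) hi (by omega) (by omega) h3 h4
      · rw [if_neg hv]
        have hmn : n ≤ (lo + hi) / 2 := by
          by_contra hc
          exact hv (hlow _ (by omega))
        exact ih lo ((lo + hi) / 2) (by omega) h2 hmn (by omega)
    · rw [dif_neg hlt]; omega

lemma consulta_eq (s : List (Int × Int)) (x : Int)
    (hs : s.Pairwise (fun a b => a.1 < b.1)) :
    consulta s x = lastTW s x := by
  have hlen : (s.takeWhile (fun e => decide (e.1 ≤ x))).length ≤ s.length :=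
    (List.takeWhile_sublist _).length_le
  have hb : bisect s x 0 s.length = (s.takeWhile (fun e => decide (e.1 ≤ x))).length := by
    apply bisect_eq s x _ _ _ s.length 0 s.length (by omega) (by omega) hlen le_rfl
    · intro m hm
      have := (takeWhile_getD (fun e => decide (e.1 ≤ x)) (0, 0) s m hm).2
      simpa using this
    · intro m h1 h2
      rcases Nat.eq_or_lt_of_le h1 with h1' | h1'
      · have := takeWhile_firstFail (fun e => decide (e.1 ≤ x)) (0, 0) s (by omega)
        rw [h1'] at this
        simpa using this
      · -- strictly after the first failure: use sortedness
        have hfail := takeWhile_firstFail (fun e => decide (e.1 ≤ x)) (0, 0) s (by omega)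
        set q := (s.takeWhile (fun e => decide (e.1 ≤ x))).length with hq
        have hql : q < s.length := by omega
        have hlt : (s.getD q (0, 0)).1 < (s.getD m (0, 0)).1 := by
          have := List.pairwise_iff_getElem.mp hs q m hql h2 h1'
          rwa [List.getD_eq_getElem s (0,0) hql, List.getD_eq_getElem s (0,0) h2]
        simp only [decide_eq_false_iff_not, not_le] at hfail
        omega
  unfold consulta lastTW
  rw [hb]
  set t := s.takeWhile (fun e => decide (e.1 ≤ x)) with ht
  by_cases h0 : 0 < t.length
  · rw [if_pos h0]
    have hc : ((t.length : Int) - 1) = ((t.length - 1 : Nat) : Int) := by omega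
    rw [hc, PySem.List.pyGetD_natCast]
    have hg := (takeWhile_getD (fun e => decide (e.1 ≤ x)) (0, 0) s (t.length - 1) (by rw [← ht]; omega)).1
    rw [← ht] at hg
    rw [← hg]
    rw [List.getLast?_eq_getElem?]
    rw [List.getElem?_eq_getElem (by omega), List.getD_eq_getElem t (0,0) (by omega)]
  · rw [if_neg h0]
    have h1 : t = [] := List.eq_nil_of_length_eq_zero (by omega)
    rw [h1]
    rfl

-- --- popGe on a sorted stack is a takeWhile ---

lemma popGe_sorted (f : Int) (s : List (Int × Int))
    (hs : s.Pairwise (fun a b => a.1 < b.1)) :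
    popGe f s = s.takeWhile (fun e => decide (e.1 < f)) := by
  induction s using List.reverseRecOn with
  | nil => simp [popGe]
  | append_singleton t e ih =>
    have hst : t.Pairwise (fun a b => a.1 < b.1) := (List.pairwise_append.mp hs).1
    have hlt : ∀ a ∈ t, a.1 < e.1 :=
      fun a ha => (List.pairwise_append.mp hs).2.2 a ha e (by simp)
    rw [popGe]
    split
    next h => simp [List.getLast?_concat] at h
    next e1 h =>
      rw [List.getLast?_concat] at h
      injection h with h
      subst h
      simp only [List.dropLast_concat]
      by_cases hf : f ≤ e.1
      · rw [if_pos hf, ih hst,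
          takeWhile_concat_false (fun e => decide (e.1 < f)) e (by simp; omega) t]
      · rw [if_neg hf, takeWhile_all _ _ ?_]
        intro a ha
        rcases List.mem_append.mp ha with ha | ha
        · have := hlt a ha; simp; omega
        · simp at ha; subst ha; simp; omega

-- --- A's backward scan in closed form ---

lemma find?_desc (qI : Int → Bool) : ∀ m : Nat,
    (match (PySem.List.pyRange ((m : Int) - 1) (-1) (-1)).find? qI with
     | some j => j
     | none => -1) = descMaxI qI m := by
  intro m; induction m with
  | zero =>
    rw [show ((0 : Nat) : Int) - 1 = -1 by norm_num,
      PySem.List.pyRange_neg_one_eq_nil le_rfl]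
    rfl
  | succ m ih =>
    rw [show ((m + 1 : Nat) : Int) - 1 = (m : Int) by push_cast; ring,
      PySem.List.pyRange_neg_one_cons (by omega)]
    simp only [List.find?]
    cases hq : qI (m : Int) with
    | true => simp [descMaxI, hq]
    | false => simpa [descMaxI, hq] using ih

lemma descMaxI_bounds (qI : Int → Bool) : ∀ m : Nat,
    -1 ≤ descMaxI qI m ∧ descMaxI qI m < m := by
  intro m; induction m with
  | zero => simp [descMaxI]
  | succ m ih =>
    simp only [descMaxI]
    cases hq : qI (m : Int) <;> simp <;> omega

-- --- invariant of the preprocessing pass ---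

def qx (charlas : List (Int × Int × Int)) (x : Int) : Int → Bool :=
  fun j => decide ((PySem.List.pyGetD charlas j (0, 0, 0)).2.1 ≤ x)

def InvP (charlas : List (Int × Int × Int)) (k : Nat) (s : List (Int × Int)) : Prop :=
  s.Pairwise (fun a b => a.1 < b.1) ∧ ∀ x : Int, lastTW s x = descMaxI (qx charlas x) k

lemma pInv_zero (charlas : List (Int × Int × Int)) : InvP charlas 0 [] := by
  refine ⟨List.Pairwise.nil, fun x => ?_⟩
  rfl

lemma pInv_step (charlas : List (Int × Int × Int)) (k : Nat) (s : List (Int × Int))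
    (h : InvP charlas k s) :
    InvP charlas (k + 1)
      (popGe ((charlas.getD k (0, 0, 0)).2.1) s ++ [((charlas.getD k (0, 0, 0)).2.1, (k : Int))]) := by
  obtain ⟨hsort, hq⟩ := h
  rw [popGe_sorted _ s hsort]
  set f := (charlas.getD k (0, 0, 0)).2.1 with hf
  set t := s.takeWhile (fun e => decide (e.1 < f)) with ht
  have hmem : ∀ a ∈ t, a.1 < f := by
    intro a ha
    have := List.mem_takeWhile_imp ha
    simpa using this
  constructor
  · rw [List.pairwise_append]
    exact ⟨List.Pairwise.sublist (List.takeWhile_sublist _) hsort, by simp,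
      fun a ha b hb => by simp at hb; subst hb; exact hmem a ha⟩
  · intro x
    have hqk : qx charlas x (k : Int) = decide (f ≤ x) := by
      simp [qx, PySem.List.pyGetD_natCast, hf]
    by_cases hfx : f ≤ x
    · have hall : (t ++ [(f, (k : Int))]).takeWhile (fun e => decide (e.1 ≤ x))
          = t ++ [(f, (k : Int))] := by
        apply takeWhile_all
        intro a ha
        rcases List.mem_append.mp ha with ha | ha
        · have := hmem a ha; simp; omega
        · simp at ha; subst ha; simp; omega
      unfold lastTW
      rw [hall, List.getLast?_concat]
      simp [descMaxI, hqk, hfx]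
    · have h1 : (t ++ [(f, (k : Int))]).takeWhile (fun e => decide (e.1 ≤ x))
          = t.takeWhile (fun e => decide (e.1 ≤ x)) :=
        takeWhile_concat_false _ _ (by simp; omega) t
      have h2 : t.takeWhile (fun e => decide (e.1 ≤ x))
          = s.takeWhile (fun e => decide (e.1 ≤ x)) := by
        rw [ht]
        apply takeWhile_takeWhile_imp
        intro e he; simp at he ⊢; omega
      unfold lastTW
      rw [h1, h2]
      have := hq x
      unfold lastTW at this
      rw [this]
      simp [descMaxI, hqk, hfx]

lemma buildP_inv (charlas : List (Int × Int × Int)) : ∀ n : Nat,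
    InvP charlas n ((List.range n).foldl (pasoP charlas) ([], [])).1 ∧
    ((List.range n).foldl (pasoP charlas) ([], [])).2.length = n ∧
    ∀ m : Nat, m < n →
      ((List.range n).foldl (pasoP charlas) ([], [])).2.getD m (-1)
        = descMaxI (qx charlas ((charlas.getD m (0, 0, 0)).1)) m := by
  intro n; induction n with
  | zero => exact ⟨pInv_zero charlas, rfl, by omega⟩
  | succ n ih =>
    obtain ⟨hinv, hlen, hget⟩ := ih
    rw [List.range_succ, List.foldl_append]
    set st := (List.range n).foldl (pasoP charlas) ([], []) with hst
    refine ⟨?_, ?_, ?_⟩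
    · simpa [pasoP] using pInv_step charlas n st.1 hinv
    · simp [pasoP, hlen]
    · intro m hm
      simp only [List.foldl_cons, List.foldl_nil, pasoP]
      by_cases hmn : m < n
      · rw [List.getD_append _ _ _ _ (by omega)]
        exact hget m hmn
      · have hmn' : m = n := by omega
        subst hmn'
        rw [List.getD_eq_getElem _ _ (by simp [hlen]),
          List.getElem_append_right (by omega)]
        simp only [hlen]
        simp only [Nat.sub_self, List.getElem_cons_zero]
        rw [consulta_eq st.1 _ hinv.1]
        exact hinv.2 _

lemma uc_closed (charlas : List (Int × Int × Int)) (m : Nat) :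
    ultimaCompatible charlas (m : Int)
      = descMaxI (qx charlas ((charlas.getD m (0, 0, 0)).1)) m := by
  unfold ultimaCompatible
  have hpred : (fun i => decide ((PySem.List.pyGetD charlas i (0, 0, 0)).2.1
        ≤ (PySem.List.pyGetD charlas (m : Int) (0, 0, 0)).1))
      = qx charlas ((charlas.getD m (0, 0, 0)).1) := by
    funext j
    simp [qx, PySem.List.pyGetD_natCast]
  rw [hpred, find?_desc]

lemma buildP_getD (charlas : List (Int × Int × Int)) (m : Nat) (hm : m < charlas.length) :
    (buildP charlas).getD m (-1) = ultimaCompatible charlas (m : Int) := by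
  unfold buildP
  rw [(buildP_inv charlas charlas.length).2.2 m hm, uc_closed]

lemma uc_bounds (charlas : List (Int × Int × Int)) (m : Nat) :
    -1 ≤ ultimaCompatible charlas (m : Int) ∧ ultimaCompatible charlas (m : Int) < m := by
  rw [uc_closed]
  exact descMaxI_bounds _ m

lemma uc_zero (charlas : List (Int × Int × Int)) :
    ultimaCompatible charlas 0 = -1 := by
  have := uc_closed charlas 0
  simpa [descMaxI] using this

-- --- the two walks agree ---

lemma walk_eq (OPT : List Int) (charlas : List (Int × Int × Int)) :
    ∀ (fuel : Nat) (i : Int) (acc : List (Int × Int × Int)), i < (charlas.length : Int) →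
      reconstruirGo OPT charlas fuel i acc
        = reconstruirGoB OPT charlas (buildP charlas) fuel i acc := by
  intro fuel; induction fuel with
  | zero => intros; rfl
  | succ fuel ih =>
    intro i acc hil
    by_cases h0 : i < 0
    · simp [reconstruirGo, reconstruirGoB, h0]
    · by_cases hi0 : i = 0
      · subst hi0
        simp [reconstruirGo, reconstruirGoB, uc_zero]
      · have hipos : 0 < i := by omega
        have him : ((i.toNat : Nat) : Int) = i := Int.toNat_of_nonneg (by omega)
        have hmlen : i.toNat < charlas.length := by omega
        have hj : PySem.List.pyGetD (buildP charlas) i (-1) = ultimaCompatible charlas i := by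
          rw [← him, PySem.List.pyGetD_natCast, buildP_getD charlas i.toNat hmlen]
        have huc : -1 ≤ ultimaCompatible charlas i ∧ ultimaCompatible charlas i < i := by
          rw [← him]; exact uc_bounds charlas i.toNat
        simp only [reconstruirGo, reconstruirGoB, if_neg h0, if_neg hi0, if_pos hipos, hj]
        have hg : (if ultimaCompatible charlas i ≠ -1 then
              (PySem.List.pyGetD charlas i (0, 0, 0)).2.2
                + PySem.List.pyGetD OPT (ultimaCompatible charlas i) 0
            else (PySem.List.pyGetD charlas i (0, 0, 0)).2.2)
            = (PySem.List.pyGetD charlas i (0, 0, 0)).2.2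
              + (if ultimaCompatible charlas i ≠ -1 then
                  PySem.List.pyGetD OPT (ultimaCompatible charlas i) 0 else 0) := by
          split <;> simp
        rw [hg]
        split_ifs <;>
          first
            | exact ih (ultimaCompatible charlas i) _ (by omega)
            | exact ih (i - 1) _ (by omega)

-- ===== VERDICT (by name: the statement is the Claim_ definition above) =====
theorem reconstruir_spec : Claim_equal_reconstruir := by
  intro OPT charlas _ _
  unfold Spec_reconstruir reconstruir reconstruir_alt
  rw [walk_eq OPT charlas _ _ _ (by omega)]
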